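-- pv_equiv track=rewrite | github.com/miliar/Code_Jam_Webscraper | solutions_python/Problem_55/132.py | get_next_run
-- ===== SOURCE A (Python) =====
-- def get_next_run(k, G, first):
--     remain = k
--     ret    = 0
--     for i in range(len(G)):
--         remain -= G[(first + i) % len(G)]
--         if remain < 0:
--             ret = i
--             break
--         if remain == 0:
--             ret = i + 1
--             break
--     return (first + ret) % len(G)
-- ===== SOURCE B (Python) =====
-- from itertools import accumulate
--
--
-- def get_next_run(k, G, first):
--     n = len(G)
--     f = first % n
--     P = list(accumulate(G[f:] + G[:f]))
--     hits = [j for j, s in enumerate(P, 1) if s >= k]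
--     if not hits:
--         ret = 0
--     elif P[hits[0] - 1] == k:
--         ret = hits[0]
--     else:
--         ret = hits[0] - 1
--     return (f + ret) % n
-- ===== Notes on version B (the rewrite author's own statement) =====
-- stated objective: alternative
-- what changed: Replaces A's single break-out loop with running remainder and modular indexing by staged whole-list passes: rotate once, build the full prefix-sum table with itertools.accumulate, collect ALL prefix lengths whose sum reaches k with a filtering comprehension, and derive the answer from the first hit by a table lookup (exact fit vs overshoot); no early exit and no per-step subtraction remain.
import Mathlib
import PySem

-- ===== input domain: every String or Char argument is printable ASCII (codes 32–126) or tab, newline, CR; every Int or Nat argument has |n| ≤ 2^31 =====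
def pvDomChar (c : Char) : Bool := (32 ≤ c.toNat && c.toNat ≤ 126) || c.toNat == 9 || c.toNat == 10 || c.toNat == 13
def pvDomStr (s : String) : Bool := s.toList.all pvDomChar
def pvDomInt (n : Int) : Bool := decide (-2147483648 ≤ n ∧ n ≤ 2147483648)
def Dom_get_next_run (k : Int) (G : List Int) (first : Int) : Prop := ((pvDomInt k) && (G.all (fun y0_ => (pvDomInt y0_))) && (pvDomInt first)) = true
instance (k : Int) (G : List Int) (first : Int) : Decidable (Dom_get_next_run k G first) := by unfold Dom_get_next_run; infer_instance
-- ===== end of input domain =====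

-- B replaces A's break-out running-remainder loop by staged whole-list passes (rotate, full prefix-sum
-- table, collect all prefix lengths reaching k, derive the answer from the first hit by table lookup);
-- objective: alternative decomposition, same O(n) cost.

-- ===== PORT A =====
-- loop body: for i over the remaining indices, subtract G[(first+i) % len(G)]; break via early return.
-- (the .getD 0 is never taken: the index is a % len(G), always in range when the loop runs)
def getNextRunLoopA (G : List Int) (first : Int) : List Int → Int → Int
  | [], _ => 0
  | i :: rest, remain =>
    let remain' := remain - (PySem.List.pyGet? G (PySem.Int.mod (first + i) (G.length : Int))).getD 0
    if remain' < 0 then i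
    else if remain' = 0 then i + 1
    else getNextRunLoopA G first rest remain'

def get_next_run (k : Int) (G : List Int) (first : Int) : Int :=
  let ret := getNextRunLoopA G first (PySem.List.pyRange 0 (G.length : Int) 1) k
  PySem.Int.mod (first + ret) (G.length : Int)

-- ===== PORT B =====
-- itertools.accumulate, ported structurally with the running sum as an accumulator
def pyAccumulate (s : Int) : List Int → List Int
  | [] => []
  | x :: xs => (s + x) :: pyAccumulate (s + x) xs

def get_next_run_alt (k : Int) (G : List Int) (first : Int) : Int :=
  let n : Int := (G.length : Int)
  let f := PySem.Int.mod first n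
  let P := pyAccumulate 0 (PySem.List.slice G (some f) none ++ PySem.List.slice G none (some f))
  -- [j for j, s in enumerate(P, 1) if s >= k]
  let hits := ((PySem.List.enumerate P 1).filter (fun p => decide (k ≤ p.2))).map (fun p => p.1)
  -- the .getD 0 is never taken: hits holds 1-based positions into P, so j - 1 is in range
  let ret : Int :=
    match hits with
    | [] => 0
    | j :: _ => if (PySem.List.pyGet? P (j - 1)).getD 0 = k then j else j - 1
  PySem.Int.mod (f + ret) n

-- ===== PRECONDITION & SPEC =====
-- Pre_ excludes only G = [], on which A raises ZeroDivisionError at `% len(G)`.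
def Pre_get_next_run (k : Int) (G : List Int) (first : Int) : Prop := G ≠ []
instance (k : Int) (G : List Int) (first : Int) : Decidable (Pre_get_next_run k G first) := by unfold Pre_get_next_run; infer_instance

def pvWitness_get_next_run : Int × List Int × Int := (4, [2, 3, 1], 1)

def Spec_get_next_run (k : Int) (G : List Int) (first : Int) (out : Int) : Prop := out = get_next_run_alt k G first
instance (k : Int) (G : List Int) (first : Int) (out : Int) : Decidable (Spec_get_next_run k G first out) := by unfold Spec_get_next_run; infer_instance

-- ===== CLAIM (what is proved, stated in full; the proofs are below) =====
def Claim_equal_get_next_run : Prop := ∀ (k : Int) (G : List Int) (first : Int), Dom_get_next_run k G first → Pre_get_next_run k G first → Spec_get_next_run k G first (get_next_run k G first)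

-- ===== LEMMAS AND PROOFS =====

-- proof-only scanner: the first pair (j, s) with s ≥ k decides the result (j on exact fit, j - 1 on overshoot)
def bScan (k : Int) : List (Int × Int) → Int
  | [] => 0
  | (j, s) :: rest => if s ≥ k then (if s = k then j else j - 1) else bScan k rest

theorem pyRange_one_self (n : Int) : PySem.List.pyRange n n 1 = [] := by
  simp [PySem.List.pyRange]

-- A's loop computes the same value as the scanner over 1-based enumerated prefix sums
theorem loops_eq (k : Int) (G : List Int) (first : Int) (hG : 0 < G.length)
    (R : List Int) (hR : R = G.rotate (PySem.Int.mod first (G.length : Int)).toNat) :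
    ∀ (t j : Nat), j + t = G.length → ∀ (remain s : Int), remain = k - s →
      getNextRunLoopA G first (PySem.List.pyRange (j : Int) (G.length : Int) 1) remain
        = bScan k (PySem.List.enumerate (pyAccumulate s (R.drop j)) ((j : Int) + 1)) := by
  have hf0 : (0:Int) ≤ PySem.Int.mod first (G.length : Int) :=
    PySem.Int.mod_nonneg first (by exact_mod_cast hG)
  have hfn : PySem.Int.mod first (G.length : Int) < (G.length : Int) :=
    PySem.Int.mod_lt first (by exact_mod_cast hG)
  set f : Nat := (PySem.Int.mod first (G.length : Int)).toNat with hfdef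
  subst hR
  intro t
  induction t with
  | zero =>
    intro j hj remain s hrs
    have hj' : j = G.length := by omega
    subst hj'
    rw [pyRange_one_self, List.drop_eq_nil_of_le (by rw [List.length_rotate])]
    simp [getNextRunLoopA, pyAccumulate, bScan]
  | succ t ih =>
    intro j hj remain s hrs
    have hjlt : j < G.length := by omega
    have hjR : j < (G.rotate f).length := by rw [List.length_rotate]; exact hjlt
    rw [PySem.List.pyRange_one_cons (by exact_mod_cast hjlt),
        List.drop_eq_getElem_cons hjR]
    have hmodeq : PySem.Int.mod (first + (j : Int)) (G.length : Int)
        = (((f + j) % G.length : Nat) : Int) := by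
      rw [PySem.Int.mod_eq_emod_of_pos (by exact_mod_cast hG)]
      have hfirst : PySem.Int.mod first (G.length : Int) = first % (G.length : Int) :=
        PySem.Int.mod_eq_emod_of_pos (by exact_mod_cast hG)
      have hfv : (f : Int) = first % (G.length : Int) := by
        rw [hfdef, hfirst]; exact Int.toNat_of_nonneg (hfirst ▸ hf0)
      have : first + (j : Int) = ((f : Int) + (j : Int)) + (G.length : Int) * (first / (G.length : Int)) := by
        rw [hfv]; have := Int.emod_add_mul_ediv first (G.length : Int); linarith
      rw [this, Int.add_mul_emod_self_left]
      push_cast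
      rfl
    have hidx : ((f + j) % G.length) < G.length := Nat.mod_lt _ hG
    have hget : (PySem.List.pyGet? G (PySem.Int.mod (first + (j : Int)) (G.length : Int))).getD 0
        = (G.rotate f)[j] := by
      rw [hmodeq, PySem.List.pyGet?_natCast, List.getElem?_eq_getElem hidx,
          List.getElem_rotate G f j hjR]
      simp [Nat.add_comm]
    show (if remain - _ < 0 then _ else if remain - _ = 0 then _ else _) = _
    rw [hget]
    simp only [pyAccumulate, PySem.List.enumerate, bScan, hrs]
    by_cases h1 : s + (G.rotate f)[j] > k
    · rw [if_pos (by omega), if_pos (by omega), if_neg (by omega)]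
      try omega
    · by_cases h2 : s + (G.rotate f)[j] = k
      · rw [if_neg (by omega), if_pos (by omega), if_pos (by omega), if_pos (by omega)]
        try omega
      · rw [if_neg (by omega), if_neg (by omega), if_neg (by omega)]
        rw [show ((j : Int) + 1) = ((j + 1 : Nat) : Int) by push_cast; ring]
        exact ih (j + 1) (by omega) (k - s - (G.rotate f)[j]) (s + (G.rotate f)[j]) (by ring)

-- the scanner equals "filter, then decide from the first hit"
theorem scan_eq_filter (k : Int) : ∀ (l : List (Int × Int)),
    bScan k l = (match l.filter (fun p => decide (k ≤ p.2)) with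
      | [] => 0
      | (j, s) :: _ => if s = k then j else j - 1) := by
  intro l
  induction l with
  | nil => simp [bScan]
  | cons p rest ih =>
    obtain ⟨j, s⟩ := p
    by_cases h : k ≤ s
    · simp [bScan, List.filter, h, ge_iff_le]
    · simp [bScan, List.filter, h, ge_iff_le, ih]

-- a member of enumerate P 1 looks its own snd back up at fst - 1
theorem enum_lookup (P : List Int) (j s : Int)
    (hmem : (j, s) ∈ PySem.List.enumerate P 1) :
    (PySem.List.pyGet? P (j - 1)).getD 0 = s := by
  rw [PySem.List.mem_enumerate_iff] at hmem
  obtain ⟨i, hi, hp⟩ := hmem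
  obtain ⟨hj, hs⟩ := Prod.mk.injEq .. ▸ hp
  have hj1 : j - 1 = (i : Int) := by omega
  rw [hj1, PySem.List.pyGet?_natCast, List.getElem?_eq_getElem hi]
  simp [hs]

-- ===== VERDICT (by name: the statement is the Claim_ definition above) =====
theorem get_next_run_spec : Claim_equal_get_next_run := by
  intro k G first _ hpre
  simp only [Spec_get_next_run, get_next_run, get_next_run_alt]
  have hG : 0 < G.length := List.length_pos_iff.mpr hpre
  have hGZ : (0:Int) < (G.length : Int) := by exact_mod_cast hG
  have hf0 : (0:Int) ≤ PySem.Int.mod first (G.length : Int) := PySem.Int.mod_nonneg first hGZ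
  have hfn : PySem.Int.mod first (G.length : Int) < (G.length : Int) := PySem.Int.mod_lt first hGZ
  set f : Nat := (PySem.Int.mod first (G.length : Int)).toNat with hfdef
  have hfle : f ≤ G.length := by omega
  have hrot : PySem.List.slice G (some (PySem.Int.mod first (G.length : Int))) none
      ++ PySem.List.slice G none (some (PySem.Int.mod first (G.length : Int)))
      = G.rotate f := by
    rw [PySem.List.slice_from G hf0, PySem.List.slice_to G hf0,
        List.rotate_eq_drop_append_take hfle]
  rw [hrot]
  -- A's ret = scanner over the enumerated prefix sums
  have hret := loops_eq k G first hG (G.rotate f) rfl G.length 0 (by omega) k 0 (by ring)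
  simp only [Nat.cast_zero, List.drop_zero, zero_add] at hret
  rw [hret, scan_eq_filter]
  -- B's ret from the filtered hits equals the scanner's value
  set P := pyAccumulate 0 (G.rotate f) with hP
  have harg : ∀ (ret : Int),
      PySem.Int.mod (first + ret) (G.length : Int) = PySem.Int.mod (PySem.Int.mod first (G.length : Int) + ret) (G.length : Int) := by
    intro ret
    rw [PySem.Int.mod_eq_emod_of_pos hGZ, PySem.Int.mod_eq_emod_of_pos hGZ,
        PySem.Int.mod_eq_emod_of_pos hGZ, Int.emod_add_emod]
  cases hfil : (PySem.List.enumerate P 1).filter (fun p => decide (k ≤ p.2)) with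
  | nil => simp only [List.map_nil]; exact harg 0
  | cons hd tl =>
    obtain ⟨j, s⟩ := hd
    have hmem : (j, s) ∈ PySem.List.enumerate P 1 :=
      List.mem_of_mem_filter (hfil ▸ List.mem_cons_self)
    have hlook := enum_lookup P j s hmem
    simp only [List.map_cons, hlook]
    by_cases hk : s = k
    · rw [if_pos hk]; exact harg j
    · rw [if_neg hk]; exact harg (j - 1)
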